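-- pv_equiv track=rewrite | github.com/mkolesnik260592-ship-it/LEARN-MIFI | lesson_8_mod_4_pract/task2_8.py | reverse_image_recursive
-- ===== SOURCE A (Python) =====
-- def reverse_image_recursive(image):
--     """Рекурсивное преобразование в негатив."""
--     if not image:
--         return []
--
--     first_row = image[0]  # Берем первую строку
--     rest_of_image = image[1:]  # Берем остальную часть изображения
--     # Инвертируем первую строку (можно использовать списковое включение)
--     inverted_first_row = [1 - pixel for pixel in first_row]
--     # Рекурсивно инвертируем остальную часть изображения
--     inverted_rest_of_image = reverse_image_recursive(rest_of_image)
--     # Объединяем инвертированную первую строку с инвертированной остальной частью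
--     return [inverted_first_row] + inverted_rest_of_image
-- ===== SOURCE B (Python) =====
-- def reverse_image_recursive(image):
--     """Iterative negative: explicit accumulator loop over rows instead of recursion."""
--     result = []
--     for row in image:
--         inverted = []
--         for pixel in row:
--             inverted.append(1 - pixel)
--         result.append(inverted)
--     return result
-- ===== Notes on version B (the rewrite author's own statement) =====
-- stated objective: simpler
-- what changed: Replaces head/tail recursion with list concatenation by a single iterative accumulator loop appending each freshly inverted row.
import Mathlib
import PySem

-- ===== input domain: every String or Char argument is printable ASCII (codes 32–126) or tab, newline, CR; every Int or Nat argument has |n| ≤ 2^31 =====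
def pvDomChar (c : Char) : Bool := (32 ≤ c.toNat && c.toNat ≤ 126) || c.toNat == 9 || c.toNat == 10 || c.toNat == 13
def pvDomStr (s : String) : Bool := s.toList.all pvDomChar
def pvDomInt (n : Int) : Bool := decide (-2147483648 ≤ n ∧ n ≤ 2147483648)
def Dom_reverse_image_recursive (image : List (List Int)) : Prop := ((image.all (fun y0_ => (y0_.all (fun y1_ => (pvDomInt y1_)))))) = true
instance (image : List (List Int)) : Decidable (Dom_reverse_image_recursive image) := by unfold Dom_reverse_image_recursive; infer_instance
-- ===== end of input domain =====

-- B replaces A's head/tail recursion + concatenation by an explicit accumulator loop over rows (objective: simpler).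


-- ===== PORT A =====
-- literal port of A: if not image → []; split off first row, invert it by a map
-- (the list comprehension), recurse on the tail (image[1:]), cons the results.
def reverse_image_recursive (image : List (List Int)) : List (List Int) :=
  match image with
  | [] => []
  | first_row :: rest_of_image =>
    let inverted_first_row := first_row.map (fun pixel => 1 - pixel)
    let inverted_rest_of_image := reverse_image_recursive rest_of_image
    [inverted_first_row] ++ inverted_rest_of_image

-- ===== PORT B =====
-- literal port of B: accumulator loops (result.append / inverted.append) as foldl with ++ [·].
def reverse_image_recursive_alt (image : List (List Int)) : List (List Int) :=
  image.foldl
    (fun result row =>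
      result ++ [row.foldl (fun inverted pixel => inverted ++ [1 - pixel]) []])
    []

-- ===== PRECONDITION & SPEC =====
def Spec_reverse_image_recursive (image : List (List Int)) (out : List (List Int)) : Prop := out = reverse_image_recursive_alt image
instance (image : List (List Int)) (out : List (List Int)) : Decidable (Spec_reverse_image_recursive image out) := by unfold Spec_reverse_image_recursive; infer_instance

-- ===== CLAIM (what is proved, stated in full; the proofs are below) =====
def Claim_equal_reverse_image_recursive : Prop := ∀ (image : List (List Int)), Dom_reverse_image_recursive image → Spec_reverse_image_recursive image (reverse_image_recursive image)

-- ===== LEMMAS AND PROOFS =====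
theorem pv_foldl_append_map {α β : Type} (f : α → β) (xs : List α) (acc : List β) :
    xs.foldl (fun r x => r ++ [f x]) acc = acc ++ xs.map f := by
  induction xs generalizing acc with
  | nil => simp
  | cons x xs ih => simp [List.foldl, ih]

theorem pv_rec_eq_map (image : List (List Int)) :
    reverse_image_recursive image
      = image.map (fun row => row.foldl (fun inverted pixel => inverted ++ [1 - pixel]) []) := by
  induction image with
  | nil => rfl
  | cons row rest ih =>
    simp only [reverse_image_recursive, List.map, ih, pv_foldl_append_map]
    simp

-- ===== VERDICT (by name: the statement is the Claim_ definition above) =====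
theorem reverse_image_recursive_spec : Claim_equal_reverse_image_recursive := by
  intro image _
  unfold Spec_reverse_image_recursive reverse_image_recursive_alt
  rw [pv_foldl_append_map, pv_rec_eq_map]
  simp
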